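-- pv_equiv track=rewrite | github.com/rieg-ec/IIC-2233 | Recuperativa/cargar_cursos.py | traducir_modulos
-- ===== SOURCE A (Python) =====
-- def traducir_modulos(modulos_string):
--     tipos_modulo = modulos_string.split(';')
--     modulos_y_horarios = [
--         i.split('#') for i in tipos_modulo]
--
--     default_dict = {tipo[0]: [] for tipo in modulos_y_horarios}
--
--     for tipo in modulos_y_horarios:
--         try:
--             dias, modulos = tipo[1].split(':')
--             dias = dias.split(',')
--             modulos = modulos.split(',')
--             for dia in dias:
--                 for modulo in modulos:
--                     default_dict[tipo[0]].append((dia, int(modulo)))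
--
--         except IndexError:
--             pass
--
--     return default_dict
-- ===== SOURCE B (Python) =====
-- def traducir_modulos(modulos_string):
--     piezas = [p.split('#') for p in modulos_string.split(';')]
--     eventos = [
--         (partes[0], (dia, int(modulo)))
--         for partes in piezas
--         if len(partes) > 1
--         for dia in partes[1].split(':')[0].split(',')
--         for modulo in partes[1].split(':')[1].split(',')
--     ]
--     return {partes[0]: [par for clave, par in eventos if clave == partes[0]]
--             for partes in piezas}
-- ===== Notes on version B (the rewrite author's own statement) =====
-- stated objective: alternative
-- what changed: Replaces A's initialize-then-mutate dict (nested day/module loops appending one tuple at a time into dict buckets) by a gather-then-group pipeline: one flat comprehension builds a tagged (key, pair) event list, and the result dict is built by filtering that list once per key.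
import Mathlib
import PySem

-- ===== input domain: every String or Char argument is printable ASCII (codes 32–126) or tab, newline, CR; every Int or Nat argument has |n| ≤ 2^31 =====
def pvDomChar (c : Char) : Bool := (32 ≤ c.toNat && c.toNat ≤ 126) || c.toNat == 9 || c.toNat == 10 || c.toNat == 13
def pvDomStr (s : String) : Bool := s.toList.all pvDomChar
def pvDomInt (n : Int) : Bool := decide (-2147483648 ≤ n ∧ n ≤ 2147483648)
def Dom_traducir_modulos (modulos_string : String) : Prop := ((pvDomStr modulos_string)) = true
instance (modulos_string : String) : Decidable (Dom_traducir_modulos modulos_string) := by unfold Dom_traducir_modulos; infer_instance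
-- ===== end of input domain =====

-- B gathers one flat tagged event list and then builds each key's bucket by filtering it (gather-then-group),
-- where A initializes a dict and mutates its buckets with nested appends; alternative decomposition, same results on Pre_.

-- s.split(sep) for a non-empty literal sep (PySem.Str.split? is none only for sep = "")
def pvSplit (s sep : String) : List String := (PySem.Str.split? s sep).getD [s]

-- ===== PORT A =====
-- body of A's fill loop over one tipo = i.split('#'); 'except IndexError: pass' = the none branch;
-- the unpacking 'dias, modulos = tipo[1].split(":")' raises ValueError unless exactly 2 parts (excluded by Pre_; port skips)
def pvFillA (d : PySem.Dict String (List (String × Int))) (tipo : List String) :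
    PySem.Dict String (List (String × Int)) :=
  match PySem.List.pyGet? tipo 1 with
  | none => d
  | some horario =>
    match pvSplit horario ":" with
    | [dias, modulos] =>
      (pvSplit dias ",").foldl (fun d dia =>
        (pvSplit modulos ",").foldl (fun d modulo =>
          d.modify (PySem.List.pyGetD tipo 0 "") []
            (· ++ [(dia, (PySem.Int.ofStr? modulo).getD 0)])) d) d
    | _ => d

def traducir_modulos (modulos_string : String) : List (String × List (String × Int)) :=
  let tipos_modulo := pvSplit modulos_string ";"
  let modulos_y_horarios := tipos_modulo.map (fun i => pvSplit i "#")
  let default_dict := modulos_y_horarios.foldl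
    (fun d tipo => d.insert (PySem.List.pyGetD tipo 0 "") []) PySem.Dict.empty
  (modulos_y_horarios.foldl pvFillA default_dict).items

-- ===== PORT B =====
-- the flat event-list comprehension of Source B; 'partes[1].split(':')[0]/[1]' is ported with pyGetD
-- (exact on Pre_, where that split has exactly two parts; int(modulo) parses on Pre_)
def pvEventos (piezas : List (List String)) : List (String × (String × Int)) :=
  piezas.flatMap (fun partes =>
    if 1 < partes.length then
      (pvSplit (PySem.List.pyGetD (pvSplit (PySem.List.pyGetD partes 1 "") ":") 0 "") ",").flatMap
        (fun dia =>
          (pvSplit (PySem.List.pyGetD (pvSplit (PySem.List.pyGetD partes 1 "") ":") 1 "") ",").map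
            (fun modulo =>
              (PySem.List.pyGetD partes 0 "", (dia, (PySem.Int.ofStr? modulo).getD 0))))
    else [])

def traducir_modulos_alt (modulos_string : String) : List (String × List (String × Int)) :=
  let piezas := (pvSplit modulos_string ";").map (fun p => pvSplit p "#")
  let eventos := pvEventos piezas
  (piezas.foldl (fun d partes =>
      d.insert (PySem.List.pyGetD partes 0 "")
        ((eventos.filter (fun e => e.1 == PySem.List.pyGetD partes 0 "")).map Prod.snd))
    PySem.Dict.empty).items

-- ===== PRECONDITION & SPEC =====
-- Pre_ excludes exactly the inputs where Python A raises an uncaught ValueError: a ';'-segment whose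
-- part after the first '#' does not split on ':' into exactly two pieces, or whose module list has a
-- non-int entry.
def Pre_traducir_modulos (modulos_string : String) : Prop :=
  ∀ p ∈ pvSplit modulos_string ";",
    2 ≤ (pvSplit p "#").length →
      ((pvSplit (PySem.List.pyGetD (pvSplit p "#") 1 "") ":").length = 2 ∧
       ∀ m ∈ pvSplit (PySem.List.pyGetD
            (pvSplit (PySem.List.pyGetD (pvSplit p "#") 1 "") ":") 1 "") ",",
         (PySem.Int.ofStr? m).isSome = true)
instance (modulos_string : String) : Decidable (Pre_traducir_modulos modulos_string) := by
  unfold Pre_traducir_modulos; infer_instance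
def pvWitness_traducir_modulos : String := "catedra#lu,ma:1,2;ayudantia"
def Spec_traducir_modulos (modulos_string : String) (out : List (String × List (String × Int))) : Prop :=
  out = traducir_modulos_alt modulos_string
instance (modulos_string : String) (out : List (String × List (String × Int))) :
    Decidable (Spec_traducir_modulos modulos_string out) := by
  unfold Spec_traducir_modulos; infer_instance

-- ===== CLAIM (what is proved, stated in full; the proofs are below) =====
def Claim_equal_traducir_modulos : Prop := ∀ (modulos_string : String),
  Dom_traducir_modulos modulos_string → Pre_traducir_modulos modulos_string →
  Spec_traducir_modulos modulos_string (traducir_modulos modulos_string)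

-- ===== LEMMAS AND PROOFS =====

-- the key of one tipo = pieza.split('#')
def pvKey (t : List String) : String := PySem.List.pyGetD t 0 ""

-- one event's effect on A's dict
def pvStep (d : PySem.Dict String (List (String × Int))) (e : String × (String × Int)) :
    PySem.Dict String (List (String × Int)) :=
  d.modify e.1 [] (· ++ [e.2])

-- the tagged events one tipo contributes in A
def pvPieceA (t : List String) : List (String × (String × Int)) :=
  match PySem.List.pyGet? t 1 with
  | none => []
  | some horario =>
    match pvSplit horario ":" with
    | [dias, modulos] =>
      (pvSplit dias ",").flatMap (fun dia =>
        (pvSplit modulos ",").map (fun m => (pvKey t, (dia, (PySem.Int.ofStr? m).getD 0))))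
    | _ => []

-- the per-tipo hypothesis Pre_ provides (only the ':'-arity part is needed for equality)
def pvOK (t : List String) : Prop :=
  2 ≤ t.length → (pvSplit (PySem.List.pyGetD t 1 "") ":").length = 2

-- A's nested fill loops over one tipo are the fold of pvStep over its tagged events
theorem pvFillA_eq_foldl_piece (d : PySem.Dict String (List (String × Int))) (t : List String) :
    pvFillA d t = (pvPieceA t).foldl pvStep d := by
  unfold pvFillA pvPieceA
  cases PySem.List.pyGet? t 1 with
  | none => rfl
  | some horario =>
    simp only
    cases h : pvSplit horario ":" with
    | nil => rfl
    | cons dias tl =>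
      cases tl with
      | nil => rfl
      | cons modulos tl' =>
        cases tl' with
        | cons z tl'' => rfl
        | nil =>
          rw [List.foldl_flatMap]
          refine PySem.List.foldl_congr_mem _ _ _ _ (fun d' dia _ => ?_)
          rw [List.foldl_map]
          rfl

-- the whole fill phase is the fold of pvStep over the flattened event list
theorem pvFill_eq_foldl_events (l : List (List String)) :
    ∀ d, l.foldl pvFillA d = (l.flatMap pvPieceA).foldl pvStep d := by
  intro d
  rw [List.foldl_flatMap]
  exact PySem.List.foldl_congr_mem _ _ _ _ (fun d' t _ => pvFillA_eq_foldl_piece d' t)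

-- under Pre_'s ':'-arity condition, B's event list is A's flattened event list
theorem pvEventos_eq (l : List (List String)) (h : ∀ t ∈ l, pvOK t) :
    pvEventos l = l.flatMap pvPieceA := by
  induction l with
  | nil => rfl
  | cons t l ih =>
    have ht : pvOK t := h t (by simp)
    have htl := ih (fun u hu => h u (by simp [hu]))
    unfold pvEventos at htl ⊢
    simp only [List.flatMap_cons, htl]
    congr 1
    unfold pvPieceA
    match t with
    | [] => rfl
    | [a] => rfl
    | a :: b :: r =>
      have hget : PySem.List.pyGet? (a :: b :: r) 1 = some b := by
        simp [PySem.List.pyGet?, PySem.List.pyIdx?]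
      have hgd : PySem.List.pyGetD (a :: b :: r) 1 "" = b := by
        simp [PySem.List.pyGetD, PySem.List.pyGet?, PySem.List.pyIdx?]
      have hlen : (1:Nat) < (a :: b :: r).length := by simp
      have h2 : (pvSplit b ":").length = 2 := by
        have := ht (by simp)
        rwa [hgd] at this
      obtain ⟨dias, modulos, hdm⟩ : ∃ x y, pvSplit b ":" = [x, y] := by
        match hsp : pvSplit b ":" with
        | [x, y] => exact ⟨x, y, rfl⟩
        | [] => rw [hsp] at h2; simp at h2
        | [x] => rw [hsp] at h2; simp at h2
        | x :: y :: z :: w => rw [hsp] at h2; simp at h2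
      simp only [if_pos hlen, hget, hgd, hdm]
      rfl

-- a dict whose looked-up-with-[] values are all [] keeps that through the init loop
theorem pvInit_getD_nil (l : List (List String)) :
    ∀ (d : PySem.Dict String (List (String × Int))),
      (∀ k, d.getD k [] = []) → ∀ k,
      (l.foldl (fun d t => d.insert (pvKey t) []) d).getD k [] = [] := by
  induction l with
  | nil => intro d hd k; exact hd k
  | cons t l ih =>
    intro d hd k
    refine ih _ (fun k' => ?_) k
    rw [PySem.Dict.getD_insert]
    split
    · rfl
    · exact hd k'

-- every event of pvPieceA t is tagged with pvKey t
theorem pvPieceA_fst (t : List String) (e : String × (String × Int)) (he : e ∈ pvPieceA t) :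
    e.1 = pvKey t := by
  unfold pvPieceA at he
  split at he
  · simp at he
  · split at he
    · simp at he
      obtain ⟨dia, _, m, _, hm⟩ := he
      rw [← hm]
    · simp at he

-- lookups in B's build loop: keys from the loop get g key, others keep their old value
theorem pvBuildB_getD (g : String → List (String × Int)) (l : List (List String)) :
    ∀ (d : PySem.Dict String (List (String × Int))) (k : String),
      (l.foldl (fun d t => d.insert (pvKey t) (g (pvKey t))) d).getD k [] =
        if k ∈ l.map pvKey then g k else d.getD k [] := by
  induction l with
  | nil => intro d k; simp
  | cons t l ih =>
    intro d k
    rw [List.foldl_cons, ih]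
    by_cases hk : k ∈ l.map pvKey
    · simp [hk]
    · rw [PySem.Dict.getD_insert]
      by_cases hkt : k = pvKey t <;> simp [hk, hkt]

-- ===== main proof =====
theorem traducir_modulos_spec : Claim_equal_traducir_modulos := by
  unfold Claim_equal_traducir_modulos
  intro s _ hpre
  unfold Spec_traducir_modulos traducir_modulos traducir_modulos_alt
  simp only
  set piezas := (pvSplit s ";").map (fun p => pvSplit p "#") with hpiezas
  have hOK : ∀ t ∈ piezas, pvOK t := by
    intro t ht
    rw [hpiezas] at ht
    obtain ⟨p, hp, rfl⟩ := List.mem_map.mp ht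
    intro h2
    exact ((hpre p hp) h2).1
  -- the two dicts
  set D0 := piezas.foldl (fun d t => d.insert (PySem.List.pyGetD t 0 "") []) PySem.Dict.empty with hD0
  have hD0' : D0 = piezas.foldl (fun d t => d.insert (pvKey t) []) PySem.Dict.empty := rfl
  set ev := pvEventos piezas with hev
  have hevA : ev = piezas.flatMap pvPieceA := pvEventos_eq piezas hOK
  set DA := piezas.foldl pvFillA D0 with hDA
  have hDAev : DA = ev.foldl pvStep D0 := by
    rw [hDA, pvFill_eq_foldl_events, hevA]
  set g : String → List (String × Int) :=
    fun k => (ev.filter (fun e => e.1 == k)).map Prod.snd with hg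
  set DB := piezas.foldl (fun d partes =>
      d.insert (PySem.List.pyGetD partes 0 "")
        ((ev.filter (fun e => e.1 == PySem.List.pyGetD partes 0 "")).map Prod.snd))
    PySem.Dict.empty with hDB
  have hDB' : DB = piezas.foldl (fun d t => d.insert (pvKey t) (g (pvKey t))) PySem.Dict.empty := rfl
  -- keys
  have hK0 : D0.keys = PySem.Set.ofList (piezas.map pvKey) := by
    rw [hD0', PySem.Dict.keys_foldl_insert_key, PySem.Dict.keys_empty,
      PySem.Set.update_nil_left]
  have hKB : DB.keys = PySem.Set.ofList (piezas.map pvKey) := by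
    rw [hDB', PySem.Dict.keys_foldl_insert_key, PySem.Dict.keys_empty,
      PySem.Set.update_nil_left]
  have hKA : DA.keys = PySem.Set.ofList (piezas.map pvKey) := by
    rw [hDAev]
    have : ev.foldl pvStep D0 =
        ev.foldl (fun d e => d.modify e.1 [] (· ++ [e.2])) D0 := rfl
    rw [this, PySem.Dict.keys_foldl_modify_key, hK0, PySem.Set.update_eq_append_filter]
    have hnil : (PySem.Set.ofList (ev.map Prod.fst)).filter
        (fun y => !(PySem.Set.contains (PySem.Set.ofList (piezas.map pvKey)) y)) = [] := by
      rw [List.filter_eq_nil_iff]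
      intro y hy
      have hy' : y ∈ ev.map Prod.fst := (PySem.Set.mem_ofList _ _).mp hy
      obtain ⟨e, he, rfl⟩ := List.mem_map.mp hy'
      rw [hevA] at he
      obtain ⟨t, ht, het⟩ := List.mem_flatMap.mp he
      have : e.1 ∈ piezas.map pvKey := List.mem_map.mpr ⟨t, ht, (pvPieceA_fst t e het).symm⟩

      simp [PySem.Set.contains_eq_listContains, (PySem.Set.mem_ofList _ _).mpr this]
    rw [hnil, List.append_nil]
  -- nodup keys
  have hnd0 : D0.keys.Nodup := by
    rw [hD0']
    exact PySem.Dict.nodup_keys_foldl_insert_key piezas pvKey (fun _ _ => []) PySem.Dict.empty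
      PySem.Dict.nodup_keys_empty
  have hndA : DA.keys.Nodup := by
    rw [hDAev]
    exact PySem.Dict.nodup_keys_foldl_modify_key ev Prod.fst [] (fun d e => (· ++ [e.2])) D0 hnd0
  have hndB : DB.keys.Nodup := by
    rw [hDB']
    exact PySem.Dict.nodup_keys_foldl_insert_key piezas pvKey (fun _ t => g (pvKey t))
      PySem.Dict.empty PySem.Dict.nodup_keys_empty
  -- values
  have hvA : ∀ k, DA.getD k [] = g k := by
    intro k
    rw [hDAev]
    have : ev.foldl pvStep D0 = ev.foldl (fun d p => d.modify p.1 [] (· ++ [p.2])) D0 := rfl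
    rw [this, PySem.Dict.getD_foldl_modify_append, hD0', pvInit_getD_nil piezas PySem.Dict.empty
      (fun k' => PySem.Dict.getD_empty k' []) k]
    simp [hg]
  have hvB : ∀ k, k ∈ piezas.map pvKey → DB.getD k [] = g k := by
    intro k hk
    rw [hDB', pvBuildB_getD, if_pos hk]
  -- items
  rw [PySem.Dict.items_eq_map_keys DA hndA [], PySem.Dict.items_eq_map_keys DB hndB [],
    hKA, hKB]
  refine List.map_congr_left (fun k hk => ?_)
  have hk' : k ∈ piezas.map pvKey := (PySem.Set.mem_ofList _ _).mp hk
  rw [hvA k, hvB k hk']
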